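-- pv_equiv track=rewrite | github.com/johnwasham/python-solutions | solutions/string_iterations/skip_iteration.py | repeat_char_jump
-- ===== SOURCE A (Python) =====
-- def repeat_char_jump(input_string, k):
--     chars = []
--     n = len(input_string)
--
--     i = 0
--     while True:
--         chars.append(input_string[i])
--         i = (i + k) % n
--         if i == 0:
--             break
--
--     return ''.join(chars)
-- ===== SOURCE B (Python) =====
-- import math
--
-- def repeat_char_jump(input_string, k):
--     n = len(input_string)
--     count = n // math.gcd(n, k)
--     return ''.join(input_string[(j * k) % n] for j in range(count))
-- ===== Notes on version B (the rewrite author's own statement) =====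
-- stated objective: simpler
-- what changed: Replaces the stateful modular walk (append, step, break when back at 0) by a closed form: the cycle length is n // gcd(n, k), so the result is directly the join of input_string[(j*k) % n] for j in range(count).
import Mathlib
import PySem

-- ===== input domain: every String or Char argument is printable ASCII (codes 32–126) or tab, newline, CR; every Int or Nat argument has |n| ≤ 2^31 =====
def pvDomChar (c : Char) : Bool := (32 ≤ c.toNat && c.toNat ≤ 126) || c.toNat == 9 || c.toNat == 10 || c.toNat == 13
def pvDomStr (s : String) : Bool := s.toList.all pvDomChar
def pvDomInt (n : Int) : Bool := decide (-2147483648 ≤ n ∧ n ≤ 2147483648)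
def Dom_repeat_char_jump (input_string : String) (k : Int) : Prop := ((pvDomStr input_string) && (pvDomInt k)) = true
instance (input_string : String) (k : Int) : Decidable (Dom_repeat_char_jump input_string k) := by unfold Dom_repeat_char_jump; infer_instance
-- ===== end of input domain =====

-- B replaces A's stateful modular walk by the closed-form cycle length n / gcd(n, |k|) (simpler decomposition, same cost);
-- equivalence is about the return value on nonempty strings (A raises IndexError on the empty string).

-- ===== PORT A =====
-- the 'while True' loop; fuel = len(input_string) is a totality guard only (the walk returns to 0 after
-- n / gcd(n, |k|) ≤ n steps, proved below); 'none' = IndexError (empty string) or the unreachable fuel exhaustion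
def rcjLoop (cs : List Char) (k : Int) : Nat → Int → List Char → Option (List Char)
  | 0, _, _ => none
  | fuel + 1, i, acc =>
    match PySem.List.pyGet? cs i with
    | none => none
    | some ch =>
      let i' := PySem.Int.mod (i + k) (cs.length : Int)
      let acc' := acc ++ [ch]
      if i' = 0 then some acc' else rcjLoop cs k fuel i' acc'

def repeat_char_jump (input_string : String) (k : Int) : String :=
  match rcjLoop input_string.toList k input_string.toList.length 0 [] with
  | some chars => String.ofList chars
  | none => ""  -- unreachable inside Pre_ (Python raises IndexError exactly here)

-- ===== PORT B =====
def repeat_char_jump_alt (input_string : String) (k : Int) : String :=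
  String.ofList ((List.range (input_string.toList.length / Nat.gcd input_string.toList.length k.natAbs)).map
    (fun (j : Nat) =>
      (PySem.List.pyGet? input_string.toList
        (PySem.Int.mod ((j : Int) * k) (input_string.toList.length : Int))).getD ' '))

-- ===== PRECONDITION & SPEC =====
-- Pre_ excludes only the empty string, on which A raises IndexError before its first step.
def Pre_repeat_char_jump (input_string : String) (k : Int) : Prop := input_string ≠ ""
instance (input_string : String) (k : Int) : Decidable (Pre_repeat_char_jump input_string k) := by
  unfold Pre_repeat_char_jump; infer_instance

def pvWitness_repeat_char_jump : String × Int := ("abcdef", -2)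

def Spec_repeat_char_jump (input_string : String) (k : Int) (out : String) : Prop :=
  out = repeat_char_jump_alt input_string k
instance (input_string : String) (k : Int) (out : String) : Decidable (Spec_repeat_char_jump input_string k out) := by
  unfold Spec_repeat_char_jump; infer_instance

-- ===== CLAIM (what is proved, stated in full; the proofs are below) =====
def Claim_equal_repeat_char_jump : Prop := ∀ (input_string : String) (k : Int),
  Dom_repeat_char_jump input_string k → Pre_repeat_char_jump input_string k →
  Spec_repeat_char_jump input_string k (repeat_char_jump input_string k)

-- ===== LEMMAS AND PROOFS =====

-- n ∣ m * t  ↔  (n / gcd n t) ∣ m, over ℕ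
theorem rcj_nat_dvd_mul_iff (n t m : Nat) (hn : 0 < n) :
    n ∣ m * t ↔ (n / Nat.gcd n t) ∣ m := by
  set g := Nat.gcd n t with hg
  have hgpos : 0 < g := Nat.gcd_pos_of_pos_left t hn
  have hgn : g ∣ n := Nat.gcd_dvd_left n t
  have hgt : g ∣ t := Nat.gcd_dvd_right n t
  have hn' : n = (n / g) * g := (Nat.div_mul_cancel hgn).symm
  have ht' : t = (t / g) * g := (Nat.div_mul_cancel hgt).symm
  have cop : Nat.Coprime (n / g) (t / g) := Nat.coprime_div_gcd_div_gcd hgpos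
  constructor
  · intro h
    have h2 : (n / g) * g ∣ (m * (t / g)) * g := by
      rw [← hn']; calc n ∣ m * t := h
        _ = (m * (t / g)) * g := by rw [mul_assoc, ← ht']
    have h3 : (n / g) ∣ m * (t / g) := (Nat.mul_dvd_mul_iff_right hgpos).mp h2
    exact cop.dvd_of_dvd_mul_right h3
  · intro h
    rw [hn', ht', ← mul_assoc]
    exact mul_dvd_mul (Dvd.dvd.mul_right h _) dvd_rfl

-- the same over ℤ, with the multiplier a cast ℕ
theorem rcj_int_dvd_iff (n t : Nat) (k : Int) (hk : k.natAbs = t) (hn : 0 < n) (m : Nat) :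
    ((n : Int) ∣ (m : Int) * k) ↔ (n / Nat.gcd n t) ∣ m := by
  rw [Int.natCast_dvd, Int.natAbs_mul, Int.natAbs_natCast, hk]
  exact rcj_nat_dvd_mul_iff n t m hn

-- A's loop, started at position (j*k) % n, produces B's characters for indices j, j+1, …, j+d-1
theorem rcj_loop_eq (cs : List Char) (k : Int) (hn : 0 < cs.length) :
    ∀ (d j : Nat) (acc : List Char) (fuel : Nat),
      j + d = cs.length / Nat.gcd cs.length k.natAbs → 0 < d → d ≤ fuel →
      rcjLoop cs k fuel (((j : Int) * k) % (cs.length : Int)) acc =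
        some (acc ++ (List.range' j d).map
          (fun (j : Nat) => (PySem.List.pyGet? cs (PySem.Int.mod ((j : Int) * k) (cs.length : Int))).getD ' ')) := by
  intro d
  induction d with
  | zero => intro j acc fuel _ hd _; omega
  | succ d ih =>
    intro j acc fuel hjd _ hfuel
    have hnpos : (0:Int) < (cs.length : Int) := by exact_mod_cast hn
    obtain ⟨fuel, rfl⟩ : ∃ f, fuel = f + 1 := ⟨fuel - 1, by omega⟩
    set i : Int := ((j : Int) * k) % (cs.length : Int) with hi
    have hi0 : 0 ≤ i := Int.emod_nonneg _ (by omega)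
    have hilt : i < (cs.length : Int) := Int.emod_lt_of_pos _ hnpos
    have hget : PySem.List.pyGet? cs i = some (cs[i.toNat]'(by omega)) := by
      rw [PySem.List.pyGet?_of_nonneg cs hi0]
      exact List.getElem?_eq_getElem (by omega)
    have hstep : PySem.Int.mod (i + k) (cs.length : Int) = (((j+1 : Nat) : Int) * k) % (cs.length : Int) := by
      rw [PySem.Int.mod_eq_emod_of_pos hnpos, hi, Int.emod_add_emod]
      push_cast; ring_nf
    set c := cs.length / Nat.gcd cs.length k.natAbs with hc
    have hdvd_iff : ((((j+1:Nat) : Int) * k) % (cs.length : Int) = 0) ↔ c ∣ (j+1) := by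
      rw [PySem.Int.emod_eq_zero_iff_dvd]
      exact rcj_int_dvd_iff cs.length k.natAbs k rfl hn (j+1)
    rw [rcjLoop, hget]
    simp only [hstep]
    by_cases hd : d = 0
    · subst hd
      have hj1 : j + 1 = c := by omega
      have hz : (((j+1:Nat) : Int) * k) % (cs.length : Int) = 0 :=
        hdvd_iff.mpr (hj1 ▸ dvd_refl c)
      rw [if_pos hz]
      have hf : (PySem.List.pyGet? cs (PySem.Int.mod ((j:Int) * k) (cs.length : Int))).getD ' ' = cs[i.toNat]'(by omega) := by
        rw [PySem.Int.mod_eq_emod_of_pos hnpos, ← hi, hget]; rfl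
      have hr : List.range' j (0+1) = [j] := by simp
      rw [hr]
      simp only [List.map_cons, List.map_nil, hf]
    · have hnz : ¬ ((((j+1:Nat) : Int) * k) % (cs.length : Int) = 0) := by
        intro hz
        have := hdvd_iff.mp hz
        have : c ≤ j + 1 := Nat.le_of_dvd (by omega) this
        omega
      rw [if_neg hnz]
      rw [ih (j+1) (acc ++ [cs[i.toNat]'(by omega)]) fuel (by omega) (by omega) (by omega)]
      have hr : List.range' j (d+1) = j :: List.range' (j+1) d := by
        rw [List.range'_succ]
      rw [hr]
      have hf : (PySem.List.pyGet? cs (PySem.Int.mod ((j:Int) * k) (cs.length : Int))).getD ' ' = cs[i.toNat]'(by omega) := by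
        rw [PySem.Int.mod_eq_emod_of_pos hnpos, ← hi, hget]; rfl
      simp only [List.map_cons, hf, List.append_assoc, List.cons_append, List.nil_append]

-- ===== VERDICT (by name: the statement is the Claim_ definition above) =====
theorem repeat_char_jump_spec : Claim_equal_repeat_char_jump := by
  intro s k _ hpre
  unfold Spec_repeat_char_jump repeat_char_jump repeat_char_jump_alt
  have hn : 0 < s.toList.length := by
    have hne : s.toList ≠ [] := by simpa using hpre
    cases h : s.toList with
    | nil => exact absurd h hne
    | cons a l => simp
  set cs := s.toList with hcs
  set c := cs.length / Nat.gcd cs.length k.natAbs with hc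
  have hgpos : 0 < Nat.gcd cs.length k.natAbs := Nat.gcd_pos_of_pos_left _ hn
  have hgle : Nat.gcd cs.length k.natAbs ≤ cs.length := Nat.le_of_dvd hn (Nat.gcd_dvd_left _ _)
  have hcpos : 0 < c := Nat.div_pos hgle hgpos
  have hcle : c ≤ cs.length := Nat.div_le_self _ _
  have h0 : (0:Int) = (((0:Nat) : Int) * k) % (cs.length : Int) := by simp
  rw [h0, rcj_loop_eq cs k hn c 0 [] cs.length (by omega) hcpos hcle]
  simp [List.range_eq_range']
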